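-- pv_equiv track=rewrite | github.com/ulyssesMonte/prog1-2019-telem-tica | minhasFuncoes_strings.py | aaa
-- ===== SOURCE A (Python) =====
-- def aaa(S): #minha versão do lower
--   s=""
--   for i in S:
--     if i =="A":
--       s=s+"a"
--     elif i =="B":
--       s=s+"b"
--     elif i =="C":
--       s=s+"c"
--     elif i =="D":
--       s=s+"d"
--     elif i =="E":
--       s=s+"e"
--     elif i =="F":
--       s=s+"f"
--     elif i =="G":
--       s=s+"g"
--     elif i =="H":
--       s=s+"h"
--     elif i =="I":
--       s=s+"i"
--     elif i =="J":
--       s=s+"j"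
--     elif i =="K":
--       s=s+"k"
--     elif i =="L":
--       s=s+"l"
--     elif i =="M":
--       s=s+"m"
--     elif i =="N":
--       s=s+"n"
--     elif i =="O":
--       s=s+"o"
--     elif i =="P":
--       s=s+"p"
--     elif i =="Q":
--       s=s+"q"
--     elif i =="R":
--       s=s+"r"
--     elif i =="S":
--       s=s+"s"
--     elif i =="T":
--       s=s+"t"
--     elif i =="U":
--       s=s+"u"
--     elif i =="V":
--       s=s+"v"
--     elif i =="W":
--       s=s+"w"
--     elif i =="X":
--       s=s+"x"
--     elif i =="Y":
--       s=s+"y"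
--     elif i =="Z":
--       s=s+"z"
--   return s
-- ===== SOURCE B (Python) =====
-- def aaa(S):
--     return "".join(chr(ord(c) + 32) for c in S if 'A' <= c <= 'Z')
-- ===== Notes on version B (the rewrite author's own statement) =====
-- stated objective: simpler
-- what changed: Replaces the 26-branch elif lookup table and string-concatenation accumulator with a single ASCII range test plus codepoint arithmetic (chr(ord(c)+32)) in a filter/map comprehension joined once.
import Mathlib
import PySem

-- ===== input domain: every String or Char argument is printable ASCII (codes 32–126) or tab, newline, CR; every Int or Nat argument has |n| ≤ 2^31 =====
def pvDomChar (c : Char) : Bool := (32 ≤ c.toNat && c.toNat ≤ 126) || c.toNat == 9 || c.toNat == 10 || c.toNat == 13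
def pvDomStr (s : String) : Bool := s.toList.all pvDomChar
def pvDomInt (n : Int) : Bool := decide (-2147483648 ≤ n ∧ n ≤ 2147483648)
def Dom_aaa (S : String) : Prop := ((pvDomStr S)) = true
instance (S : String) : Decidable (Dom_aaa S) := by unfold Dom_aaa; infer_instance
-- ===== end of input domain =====

-- B replaces A's 26-branch elif table with a single ASCII range test plus codepoint
-- arithmetic; objective: simpler.

-- ===== PORT A =====
-- one iteration of A's for-loop: the 26-branch elif chain
def aaaStep (s : String) (i : Char) : String :=
  if i = 'A' then s ++ "a"
  else if i = 'B' then s ++ "b"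
  else if i = 'C' then s ++ "c"
  else if i = 'D' then s ++ "d"
  else if i = 'E' then s ++ "e"
  else if i = 'F' then s ++ "f"
  else if i = 'G' then s ++ "g"
  else if i = 'H' then s ++ "h"
  else if i = 'I' then s ++ "i"
  else if i = 'J' then s ++ "j"
  else if i = 'K' then s ++ "k"
  else if i = 'L' then s ++ "l"
  else if i = 'M' then s ++ "m"
  else if i = 'N' then s ++ "n"
  else if i = 'O' then s ++ "o"
  else if i = 'P' then s ++ "p"
  else if i = 'Q' then s ++ "q"
  else if i = 'R' then s ++ "r"
  else if i = 'S' then s ++ "s"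
  else if i = 'T' then s ++ "t"
  else if i = 'U' then s ++ "u"
  else if i = 'V' then s ++ "v"
  else if i = 'W' then s ++ "w"
  else if i = 'X' then s ++ "x"
  else if i = 'Y' then s ++ "y"
  else if i = 'Z' then s ++ "z"
  else s

def aaa (S : String) : String := S.toList.foldl aaaStep ""

-- ===== PORT B =====
def aaa_alt (S : String) : String :=
  String.ofList (((S.toList.filter (fun c => decide ('A' ≤ c) && decide (c ≤ 'Z'))).map
    (fun c => Char.ofNat (c.toNat + 32))))

-- ===== PRECONDITION & SPEC =====
def Spec_aaa (S : String) (out : String) : Prop := out = aaa_alt S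
instance (S : String) (out : String) : Decidable (Spec_aaa S out) := by unfold Spec_aaa; infer_instance

-- ===== CLAIM (what is proved, stated in full; the proofs are below) =====
def Claim_equal_aaa : Prop := ∀ (S : String), Dom_aaa S → Spec_aaa S (aaa S)

-- ===== LEMMAS AND PROOFS =====

theorem char_eq_of_toNat (c : Char) (n : Nat) (h : c.toNat = n) : c = Char.ofNat n := by
  subst h; exact (Char.ofNat_toNat c).symm

theorem step_eq (s : String) (c : Char) :
    aaaStep s c =
      s ++ (if 'A' ≤ c ∧ c ≤ 'Z' then String.ofList [Char.ofNat (c.toNat + 32)] else "") := by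
  unfold aaaStep
  by_cases hA : c = 'A'
  · subst hA; simp
  by_cases hB : c = 'B'
  · subst hB; simp
  by_cases hC : c = 'C'
  · subst hC; simp
  by_cases hD : c = 'D'
  · subst hD; simp
  by_cases hE : c = 'E'
  · subst hE; simp
  by_cases hF : c = 'F'
  · subst hF; simp
  by_cases hG : c = 'G'
  · subst hG; simp
  by_cases hH : c = 'H'
  · subst hH; simp
  by_cases hI : c = 'I'
  · subst hI; simp
  by_cases hJ : c = 'J'
  · subst hJ; simp
  by_cases hK : c = 'K'
  · subst hK; simp
  by_cases hL : c = 'L'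
  · subst hL; simp
  by_cases hM : c = 'M'
  · subst hM; simp
  by_cases hN : c = 'N'
  · subst hN; simp
  by_cases hO : c = 'O'
  · subst hO; simp
  by_cases hP : c = 'P'
  · subst hP; simp
  by_cases hQ : c = 'Q'
  · subst hQ; simp
  by_cases hR : c = 'R'
  · subst hR; simp
  by_cases hS : c = 'S'
  · subst hS; simp
  by_cases hT : c = 'T'
  · subst hT; simp
  by_cases hU : c = 'U'
  · subst hU; simp
  by_cases hV : c = 'V'
  · subst hV; simp
  by_cases hW : c = 'W'
  · subst hW; simp
  by_cases hX : c = 'X'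
  · subst hX; simp
  by_cases hY : c = 'Y'
  · subst hY; simp
  by_cases hZ : c = 'Z'
  · subst hZ; simp
  have nA : c.toNat ≠ 65 := fun h => hA (by rw [char_eq_of_toNat c 65 h])
  have nB : c.toNat ≠ 66 := fun h => hB (by rw [char_eq_of_toNat c 66 h])
  have nC : c.toNat ≠ 67 := fun h => hC (by rw [char_eq_of_toNat c 67 h])
  have nD : c.toNat ≠ 68 := fun h => hD (by rw [char_eq_of_toNat c 68 h])
  have nE : c.toNat ≠ 69 := fun h => hE (by rw [char_eq_of_toNat c 69 h])
  have nF : c.toNat ≠ 70 := fun h => hF (by rw [char_eq_of_toNat c 70 h])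
  have nG : c.toNat ≠ 71 := fun h => hG (by rw [char_eq_of_toNat c 71 h])
  have nH : c.toNat ≠ 72 := fun h => hH (by rw [char_eq_of_toNat c 72 h])
  have nI : c.toNat ≠ 73 := fun h => hI (by rw [char_eq_of_toNat c 73 h])
  have nJ : c.toNat ≠ 74 := fun h => hJ (by rw [char_eq_of_toNat c 74 h])
  have nK : c.toNat ≠ 75 := fun h => hK (by rw [char_eq_of_toNat c 75 h])
  have nL : c.toNat ≠ 76 := fun h => hL (by rw [char_eq_of_toNat c 76 h])
  have nM : c.toNat ≠ 77 := fun h => hM (by rw [char_eq_of_toNat c 77 h])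
  have nN : c.toNat ≠ 78 := fun h => hN (by rw [char_eq_of_toNat c 78 h])
  have nO : c.toNat ≠ 79 := fun h => hO (by rw [char_eq_of_toNat c 79 h])
  have nP : c.toNat ≠ 80 := fun h => hP (by rw [char_eq_of_toNat c 80 h])
  have nQ : c.toNat ≠ 81 := fun h => hQ (by rw [char_eq_of_toNat c 81 h])
  have nR : c.toNat ≠ 82 := fun h => hR (by rw [char_eq_of_toNat c 82 h])
  have nS : c.toNat ≠ 83 := fun h => hS (by rw [char_eq_of_toNat c 83 h])
  have nT : c.toNat ≠ 84 := fun h => hT (by rw [char_eq_of_toNat c 84 h])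
  have nU : c.toNat ≠ 85 := fun h => hU (by rw [char_eq_of_toNat c 85 h])
  have nV : c.toNat ≠ 86 := fun h => hV (by rw [char_eq_of_toNat c 86 h])
  have nW : c.toNat ≠ 87 := fun h => hW (by rw [char_eq_of_toNat c 87 h])
  have nX : c.toNat ≠ 88 := fun h => hX (by rw [char_eq_of_toNat c 88 h])
  have nY : c.toNat ≠ 89 := fun h => hY (by rw [char_eq_of_toNat c 89 h])
  have nZ : c.toNat ≠ 90 := fun h => hZ (by rw [char_eq_of_toNat c 90 h])
  have hno : ¬ ('A' ≤ c ∧ c ≤ 'Z') := by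
    rintro ⟨h1, h2⟩
    rw [Char.le_def, UInt32.le_iff_toNat_le] at h1 h2
    have e1 : (65:Nat) ≤ c.toNat := h1
    have e2 : c.toNat ≤ 90 := h2
    omega
  simp [hA, hB, hC, hD, hE, hF, hG, hH, hI, hJ, hK, hL, hM, hN, hO, hP, hQ, hR, hS, hT, hU, hV, hW, hX, hY, hZ, hno]


theorem fold_eq (l : List Char) (s : String) :
    l.foldl aaaStep s =
      s ++ String.ofList ((l.filter (fun c => decide ('A' ≤ c) && decide (c ≤ 'Z'))).map
        (fun c => Char.ofNat (c.toNat + 32))) := by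
  induction l generalizing s with
  | nil => simp
  | cons c l ih =>
    simp only [List.foldl_cons, step_eq, ih, List.filter_cons]
    by_cases h : 'A' ≤ c ∧ c ≤ 'Z'
    · simp [h, String.append_assoc, ← String.ofList_append]
    · have hb : (decide ('A' ≤ c) && decide (c ≤ 'Z')) = false := by
        simp only [Bool.and_eq_false_iff, decide_eq_false_iff_not]
        by_cases h1 : 'A' ≤ c
        · exact Or.inr (fun h2 => h ⟨h1, h2⟩)
        · exact Or.inl h1
      simp [h, hb]

-- ===== VERDICT (by name: the statement is the Claim_ definition above) =====
theorem aaa_spec : Claim_equal_aaa := by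
  intro S _
  unfold Spec_aaa aaa aaa_alt
  simpa using fold_eq S.toList ""
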